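-- pv_equiv track=rewrite | github.com/icpc-live/autoanalyst | code_analyzer/analyzer.py | stripDecoration
-- ===== SOURCE A (Python) =====
-- def stripDecoration( strips, str ):
--     last = None
--     while str != last:
--         last = str
--         for s in strips:
--             idx = str.find( s )
--             while idx != -1:
--                 str = str[:idx] + str[(idx + len( s )):]
--                 idx = str.find( s )
--
--     return str
-- ===== SOURCE B (Python) =====
-- def _scrubOnce(s, text):
--     # one stack pass: push each character, pop len(s) whenever the stack top spells s;
--     # this performs exactly the repeated leftmost deletion of s in a single traversal
--     n = len(s)
--     suffix = list(s)
--     stack = []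
--     for c in text:
--         stack.append(c)
--         if stack[-n:] == suffix:
--             del stack[-n:]
--     return ''.join(stack)
--
-- def stripDecoration(strips, str):
--     prev = None
--     while str != prev:
--         prev = str
--         for s in strips:
--             if s and s in str:
--                 str = _scrubOnce(s, str)
--     return str
-- ===== Notes on version B (the rewrite author's own statement) =====
-- stated objective: alternative
-- what changed: A's inner loop repeatedly calls str.find from the start and re-splices the whole string for every single deletion; B removes all occurrences of a present pattern in one stack-based pass (push each character, pop len(s) whenever the stack top spells the pattern), which carries out the same sequence of leftmost deletions in a single traversal; the outer stabilization loop is kept. Pre_ excludes strips containing the empty string, on which Python A loops forever (find('') is 0 and the splice never changes str).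
import Mathlib
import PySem

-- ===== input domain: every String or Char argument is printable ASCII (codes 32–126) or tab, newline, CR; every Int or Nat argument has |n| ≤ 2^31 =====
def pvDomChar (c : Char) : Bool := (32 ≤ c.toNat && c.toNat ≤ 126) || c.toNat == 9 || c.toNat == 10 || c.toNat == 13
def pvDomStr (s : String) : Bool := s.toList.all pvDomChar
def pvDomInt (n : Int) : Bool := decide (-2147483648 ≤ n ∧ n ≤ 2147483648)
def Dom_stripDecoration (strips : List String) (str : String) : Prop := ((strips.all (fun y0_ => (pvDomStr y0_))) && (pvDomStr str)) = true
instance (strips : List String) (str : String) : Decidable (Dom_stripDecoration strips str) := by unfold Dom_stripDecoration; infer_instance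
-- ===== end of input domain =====

-- B replaces A's repeated find-and-splice inner loop by one stack pass per pattern
-- (push a character, pop |s| characters whenever the stack top spells s), keeping the
-- outer stabilization loop; the ports agree on every input with no empty strip.

-- ===== PORT A =====
-- inner 'while idx != -1' loop of A. The fuel argument only makes the recursion structural:
-- every iteration deletes ≥ 1 character (s ≠ [] is guarded in removeAllA), so x.length
-- iterations always reach the idx = -1 exit and the fuel never runs out.
def removeAllAFuel (s : List Char) : Nat → List Char → List Char
  | 0, x => x
  | Nat.succ n, x =>
    if PySem.Chars.find x s = -1 then x
    else removeAllAFuel s n (PySem.List.slice x none (some (PySem.Chars.find x s)) ++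
                             PySem.List.slice x (some (PySem.Chars.find x s + (s.length : Int))) none)

-- the 's = []' test only makes the function total: Python A never returns when a strip is
-- empty (find('') is 0 and the splice leaves str unchanged); Pre_ excludes that input.
def removeAllA (s x : List Char) : List Char :=
  if s = [] then x else removeAllAFuel s x.length x

-- the 'for s in strips' pass of A's outer loop
def passA (strips : List (List Char)) (x : List Char) : List Char :=
  strips.foldl (fun acc s => removeAllA s acc) x

-- the 'while str != last' loop of A; fuel only makes it structural: every iteration that
-- does not exit shrinks the string, so length + 1 iterations always reach the fixpoint exit.
def loopAFuel (strips : List (List Char)) : Nat → List Char → List Char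
  | 0, x => x
  | Nat.succ n, x =>
    let y := passA strips x
    if y = x then y else loopAFuel strips n y

def stripDecoration (strips : List String) (str : String) : String :=
  String.ofList (loopAFuel (strips.map String.toList) (str.toList.length + 1) str.toList)

-- ===== PORT B =====
-- B's stack pass: the Python list used as a stack is represented head-first (head = top),
-- so 'stack[-n:] == list(s)' becomes 'rs.isPrefixOf stack' with rs = s.reverse,
-- 'del stack[-n:]' becomes 'stack.drop n', and the final ''.join is a reverse.
def scrubGo (rs : List Char) (n : Nat) : List Char → List Char → List Char
  | [], stack => stack.reverse
  | c :: rest, stack =>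
    scrubGo rs n rest (if rs.isPrefixOf (c :: stack) then (c :: stack).drop n else c :: stack)

def scrubOnce (s x : List Char) : List Char :=
  scrubGo s.reverse s.length x []

-- the 'for s in strips' pass of B, with the 'if s and s in str:' guard inline
def passB (strips : List (List Char)) (x : List Char) : List Char :=
  match strips with
  | [] => x
  | s :: rest =>
    passB rest (if s = [] then x
                else if PySem.Chars.isIn s x = false then x
                else scrubOnce s x)

-- B's 'prev = None; while str != prev' loop, fuel only making it structural as in A
def loopBFuel (strips : List (List Char)) : Nat → Option (List Char) → List Char → List Char
  | 0, _, x => x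
  | Nat.succ n, prev, x =>
    if some x = prev then x else loopBFuel strips n (some x) (passB strips x)

def stripDecoration_alt (strips : List String) (str : String) : String :=
  String.ofList (loopBFuel (strips.map String.toList) (str.toList.length + 2) none str.toList)

-- ===== PRECONDITION & SPEC =====
-- Pre_ excludes strips containing the empty string: there Python A never returns
-- (str.find('') is 0 and the splice leaves str unchanged, an infinite loop).
def Pre_stripDecoration (strips : List String) (str : String) : Prop :=
  "" ∉ strips
instance (strips : List String) (str : String) : Decidable (Pre_stripDecoration strips str) := by
  unfold Pre_stripDecoration; infer_instance

def pvWitness_stripDecoration : List String × String := (["[x]", "--"], "a[x]b--c")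

def Spec_stripDecoration (strips : List String) (str : String) (out : String) : Prop :=
  out = stripDecoration_alt strips str
instance (strips : List String) (str : String) (out : String) :
    Decidable (Spec_stripDecoration strips str out) := by
  unfold Spec_stripDecoration; infer_instance

-- ===== CLAIM (what is proved, stated in full; the proofs are below) =====
def Claim_equal_stripDecoration : Prop := ∀ (strips : List String) (str : String), Dom_stripDecoration strips str → Pre_stripDecoration strips str → Spec_stripDecoration strips str (stripDecoration strips str)

-- ===== LEMMAS AND PROOFS =====

-- proof-only intermediate form of B's stack step, on the unreversed stack
def stepB (s out : List Char) (c : Char) : List Char :=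
  let out' := out ++ [c]
  if s.length ≤ out'.length ∧ out'.drop (out'.length - s.length) = s then
    out'.take (out'.length - s.length)
  else out'

-- a prefix of l ++ l' that fits inside l is a prefix of l
theorem prefix_of_append_of_le {α : Type} (s l l' : List α)
    (h : s <+: l ++ l') (hle : s.length ≤ l.length) : s <+: l := by
  have htake : s = l.take s.length :=
    (List.prefix_iff_eq_take.mp h).trans (List.take_append_of_le_length hle)
  rw [htake]
  exact List.take_prefix _ _

-- an infix occurs as a prefix of some drop
theorem exists_prefix_drop_of_infix {α : Type} (s x : List α) (h : s <:+: x) :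
    ∃ i, s <+: x.drop i := by
  obtain ⟨l, r, rfl⟩ := h
  exact ⟨l.length, by rw [List.append_assoc, List.drop_left]; exact s.prefix_append r⟩

-- find = j when s occurs (as a prefix of the drop) at j and nowhere earlier
theorem find_eq_of (x s : List Char) (j : Nat) (hj : s <+: x.drop j)
    (hmin : ∀ i < j, ¬ s <+: x.drop i) : PySem.Chars.find x s = (j : Int) := by
  have hinf : s <:+: x := hj.isInfix.trans (List.drop_suffix j x).isInfix
  have h0 : 0 ≤ PySem.Chars.find x s := (PySem.Chars.find_nonneg_iff x s).mpr hinf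
  obtain ⟨hpre, hmin'⟩ := PySem.Chars.find_spec h0
  rcases lt_trichotomy (PySem.Chars.find x s).toNat j with h | h | h
  · exact absurd hpre (hmin _ h)
  · omega
  · exact absurd hj (hmin' j h)

-- an s-free string is returned unchanged, whatever the fuel
theorem removeAllAFuel_of_no_occ (s x : List Char) (fuel : Nat) (hocc : ¬ s <:+: x) :
    removeAllAFuel s fuel x = x := by
  cases fuel with
  | zero => rfl
  | succ n =>
    simp only [removeAllAFuel]
    rw [if_pos ((PySem.Chars.find_eq_neg_one_iff x s).mpr hocc)]

-- the crux: processing st ++ rest with the stack already holding the s-free prefix st,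
-- the stack pass computes exactly A's repeated leftmost deletion
theorem removeAllA_eq_stack (s : List Char) (hs : s ≠ []) :
    ∀ (rest st : List Char) (fuel : Nat), (st ++ rest).length ≤ fuel → ¬ s <:+: st →
      removeAllAFuel s fuel (st ++ rest) = rest.foldl (stepB s) st := by
  have hs1 : 1 ≤ s.length := by
    cases s with
    | nil => exact absurd rfl hs
    | cons a t => simp
  intro rest
  induction rest with
  | nil =>
    intro st fuel _ hocc
    rw [List.foldl_nil, List.append_nil,
        removeAllAFuel_of_no_occ s st fuel hocc]
  | cons c rest' ih =>
    intro st fuel hfuel hocc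
    by_cases hc : s.length ≤ (st ++ [c]).length ∧
        (st ++ [c]).drop ((st ++ [c]).length - s.length) = s
    · -- the new character completes an occurrence of s at the top of the stack
      obtain ⟨hle, hdrop⟩ := hc
      simp only [List.length_append, List.length_singleton] at hle hdrop
      set j := st.length + 1 - s.length with hjdef
      have hjle : j ≤ st.length := by omega
      have hfull : st ++ c :: rest' = (st ++ [c]) ++ rest' := by simp
      have hdropj : ((st ++ [c]) ++ rest').drop j = s ++ rest' := by
        rw [List.drop_append_of_le_length (by simp; omega), hdrop]
      have hfind : PySem.Chars.find (st ++ c :: rest') s = (j : Int) := by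
        refine find_eq_of _ _ j ?_ ?_
        · rw [hfull, hdropj]; exact s.prefix_append rest'
        · intro i hi hpref
          rw [hfull, List.drop_append_of_le_length (by simp; omega)] at hpref
          have hpre2 : s <+: (st ++ [c]).drop i :=
            prefix_of_append_of_le _ _ _ hpref (by simp; omega)
          rw [List.drop_append_of_le_length (by omega)] at hpre2
          have hpre3 : s <+: st.drop i :=
            prefix_of_append_of_le _ _ _ hpre2 (by simp; omega)
          exact hocc (hpre3.isInfix.trans (List.drop_suffix i st).isInfix)
      obtain ⟨n, rfl⟩ : ∃ n, fuel = n + 1 := by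
        cases fuel with
        | zero => simp at hfuel
        | succ n => exact ⟨n, rfl⟩
      have hne : ¬ PySem.Chars.find (st ++ c :: rest') s = -1 := by
        rw [hfind]
        omega
      simp only [removeAllAFuel]
      rw [if_neg hne, hfind]
      have hslice1 : PySem.List.slice (st ++ c :: rest') none (some ((j : Nat) : Int)) =
          st.take j := by
        rw [PySem.List.slice_to _ (by omega)]
        simp only [Int.toNat_natCast]
        rw [hfull, List.take_append_of_le_length (by simp; omega),
            List.take_append_of_le_length hjle]
      have hslice2 : PySem.List.slice (st ++ c :: rest')
          (some (((j : Nat) : Int) + (s.length : Int))) none = rest' := by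
        rw [PySem.List.slice_from _ (by omega)]
        have hnat : (((j : Nat) : Int) + (s.length : Int)).toNat = st.length + 1 := by omega
        rw [hnat, hfull, List.drop_append_of_le_length (by simp)]
        simp
      rw [hslice1, hslice2]
      have hstack : stepB s st c = st.take j := by
        simp only [stepB]
        rw [if_pos ⟨by simp; omega, by simpa using hdrop⟩]
        simp only [List.length_append, List.length_singleton]
        rw [List.take_append_of_le_length hjle]
      have hocc' : ¬ s <:+: st.take j := fun h =>
        hocc (h.trans (List.take_prefix j st).isInfix)
      rw [List.foldl_cons, hstack]
      refine ih (st.take j) n ?_ hocc'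
      have : (st ++ c :: rest').length ≤ n + 1 := hfuel
      simp only [List.length_append, List.length_take, List.length_cons] at this ⊢
      omega
    · -- no occurrence is completed: push and continue
      have hstep : stepB s st c = st ++ [c] := by
        simp only [stepB]
        rw [if_neg hc]
      have hocc' : ¬ s <:+: st ++ [c] := by
        intro hinf
        obtain ⟨i, hpref⟩ := exists_prefix_drop_of_infix _ _ hinf
        have hplen := hpref.length_le
        simp only [List.length_drop, List.length_append, List.length_singleton] at hplen
        by_cases hin : i + s.length ≤ st.length
        · rw [List.drop_append_of_le_length (by omega)] at hpref
          have hpre2 : s <+: st.drop i :=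
            prefix_of_append_of_le _ _ _ hpref (by simp; omega)
          exact hocc (hpre2.isInfix.trans (List.drop_suffix i st).isInfix)
        · have hlen2 : ((st ++ [c]).drop i).length = s.length := by
            simp only [List.length_drop, List.length_append, List.length_singleton]
            omega
          have heq : s = (st ++ [c]).drop i := hpref.eq_of_length (by omega)
          exact hc ⟨by simp; omega,
            by rw [show (st ++ [c]).length - s.length = i by simp; omega]; exact heq.symm⟩
      rw [List.foldl_cons, hstep, show st ++ c :: rest' = (st ++ [c]) ++ rest' by simp]
      refine ih (st ++ [c]) fuel ?_ hocc'
      simpa using hfuel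

-- B's reversed-stack pass computes the foldl over stepB
theorem scrubGo_eq_foldl (s : List Char) :
    ∀ (x stack : List Char),
      scrubGo s.reverse s.length x stack = x.foldl (stepB s) stack.reverse := by
  intro x
  induction x with
  | nil => intro stack; rfl
  | cons c rest ih =>
    intro stack
    rw [List.foldl_cons]
    have hcond : s.reverse.isPrefixOf (c :: stack) = true ↔
        (s.length ≤ (stack.reverse ++ [c]).length ∧
         (stack.reverse ++ [c]).drop ((stack.reverse ++ [c]).length - s.length) = s) := by
      rw [List.isPrefixOf_iff_prefix,
          show (c :: stack) = (stack.reverse ++ [c]).reverse by simp,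
          List.reverse_prefix]
      constructor
      · intro h
        exact ⟨h.length_le, (List.suffix_iff_eq_drop.mp h).symm⟩
      · rintro ⟨-, hdrop⟩
        exact List.suffix_iff_eq_drop.mpr hdrop.symm
    simp only [scrubGo]
    by_cases h : s.reverse.isPrefixOf (c :: stack) = true
    · have hstep : stepB s stack.reverse c = ((c :: stack).drop s.length).reverse := by
        simp only [stepB]
        rw [if_pos (hcond.mp h), List.reverse_drop]
        simp
      rw [if_pos h, ih, hstep]
    · have hstep : stepB s stack.reverse c = (c :: stack).reverse := by
        simp only [stepB]
        rw [if_neg (fun hc => h (hcond.mpr hc))]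
        simp
      rw [if_neg h, ih, hstep]

-- per-pattern equality
theorem removeAllA_eq_scrubOnce (s x : List Char) (hs : s ≠ []) :
    removeAllA s x = scrubOnce s x := by
  unfold removeAllA scrubOnce
  rw [if_neg hs, scrubGo_eq_foldl]
  have h := removeAllA_eq_stack s hs x [] x.length (by simp)
    (by simp only [List.infix_nil]; exact hs)
  simpa using h

theorem passA_eq_passB (strips : List (List Char)) (hne : [] ∉ strips) (x : List Char) :
    passA strips x = passB strips x := by
  induction strips generalizing x with
  | nil => rfl
  | cons s rest ih =>
    have hs : s ≠ [] := fun h => hne (h ▸ List.mem_cons_self)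
    have hrest : [] ∉ rest := fun h => hne (List.mem_cons_of_mem _ h)
    show passA rest (removeAllA s x)
        = passB rest (if s = [] then x
                      else if PySem.Chars.isIn s x = false then x
                      else scrubOnce s x)
    rw [if_neg hs]
    by_cases hin : PySem.Chars.isIn s x = false
    · rw [if_pos hin,
          show removeAllA s x = x by
            unfold removeAllA
            rw [if_neg hs]
            exact removeAllAFuel_of_no_occ s x x.length
              ((PySem.Chars.isIn_eq_false_iff s x).mp hin)]
      exact ih hrest _
    · rw [if_neg hin, removeAllA_eq_scrubOnce s x hs]
      exact ih hrest _

-- length bookkeeping for the stack pass: it never grows the string,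
-- and it changes the string as soon as it shrinks it
theorem foldl_stepB_len_le (s : List Char) :
    ∀ (x st : List Char), (x.foldl (stepB s) st).length ≤ st.length + x.length := by
  intro x
  induction x with
  | nil => intro st; simp
  | cons c rest ih =>
    intro st
    rw [List.foldl_cons]
    have hstep : (stepB s st c).length ≤ st.length + 1 := by
      simp only [stepB]
      split
      · simp only [List.length_take, List.length_append, List.length_cons, List.length_nil]
        omega
      · simp
    calc (rest.foldl (stepB s) (stepB s st c)).length
        ≤ (stepB s st c).length + rest.length := ih _
      _ ≤ st.length + (rest.length + 1) := by omega

theorem foldl_stepB_eq_of_len (s : List Char) (hs : s ≠ []) :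
    ∀ (x st : List Char), (x.foldl (stepB s) st).length = st.length + x.length →
      x.foldl (stepB s) st = st ++ x := by
  have hs1 : 1 ≤ s.length := by
    cases s with
    | nil => exact absurd rfl hs
    | cons a t => simp
  intro x
  induction x with
  | nil => intro st _; simp
  | cons c rest ih =>
    intro st hlen
    rw [List.foldl_cons] at hlen ⊢
    by_cases h : s.length ≤ (st ++ [c]).length ∧
        (st ++ [c]).drop ((st ++ [c]).length - s.length) = s
    · exfalso
      have hstep : (stepB s st c).length = (st ++ [c]).length - s.length := by
        simp only [stepB]
        rw [if_pos h]
        obtain ⟨hle', -⟩ := h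
        simp only [List.length_take, List.length_append, List.length_cons, List.length_nil]
          at hle' ⊢
        omega
      have h2 := foldl_stepB_len_le s rest (stepB s st c)
      obtain ⟨h3, -⟩ := h
      simp only [List.length_append, List.length_cons, List.length_nil]
        at hstep h3 hlen
      omega
    · have hstep : stepB s st c = st ++ [c] := by
        simp only [stepB]
        rw [if_neg h]
      rw [hstep] at hlen ⊢
      have hlen' : (rest.foldl (stepB s) (st ++ [c])).length
          = (st ++ [c]).length + rest.length := by
        simp only [List.length_append, List.length_cons, List.length_nil]
          at hlen ⊢
        omega
      rw [ih (st ++ [c]) hlen']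
      simp

theorem passB_len (strips : List (List Char)) (x : List Char) :
    (passB strips x).length ≤ x.length ∧
    ((passB strips x).length = x.length → passB strips x = x) := by
  induction strips generalizing x with
  | nil => exact ⟨le_refl _, fun _ => rfl⟩
  | cons s rest ih =>
    have hunf : passB (s :: rest) x
        = passB rest (if s = [] then x
                      else if PySem.Chars.isIn s x = false then x
                      else scrubOnce s x) := rfl
    by_cases hs : s = []
    · rw [hunf, if_pos hs]; exact ih x
    rw [hunf, if_neg hs]
    by_cases hin : PySem.Chars.isIn s x = false
    · rw [if_pos hin]; exact ih x
    rw [if_neg hin]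
    have hsc : scrubOnce s x = x.foldl (stepB s) [] := by
      unfold scrubOnce
      rw [scrubGo_eq_foldl]
      rfl
    have hle : (scrubOnce s x).length ≤ x.length := by
      rw [hsc]
      simpa using foldl_stepB_len_le s x []
    obtain ⟨ihle, iheq⟩ := ih (scrubOnce s x)
    refine ⟨le_trans ihle hle, fun heq => ?_⟩
    have hlen : (scrubOnce s x).length = x.length := by omega
    have hsceq : scrubOnce s x = x := by
      rw [hsc]
      have h0 : (x.foldl (stepB s) []).length = ([] : List Char).length + x.length := by
        rw [← hsc]
        simpa using hlen
      simpa using foldl_stepB_eq_of_len s hs x [] h0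
    rw [hsceq] at iheq heq ⊢
    exact iheq heq

-- the two outer loops agree with enough fuel
theorem loop_eq (strips : List (List Char)) (hne : [] ∉ strips) :
    ∀ (k : Nat) (x : List Char), x.length < k →
      loopBFuel strips k (some x) (passB strips x) = loopAFuel strips k x := by
  intro k
  induction k with
  | zero => intro x hx; omega
  | succ m ih =>
    intro x hx
    have hp := passA_eq_passB strips hne x
    simp only [loopBFuel, loopAFuel]
    by_cases h : passB strips x = x
    · rw [if_pos (show some (passB strips x) = some x by rw [h]),
          if_pos (show passA strips x = x from hp.trans h)]
      exact hp.symm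
    · rw [if_neg (show ¬ some (passB strips x) = some x from
            fun hc => h (Option.some.inj hc)),
          if_neg (show ¬ passA strips x = x from fun hc => h (hp.symm.trans hc))]
      rw [hp]
      refine ih (passB strips x) ?_
      obtain ⟨hle, heq⟩ := passB_len strips x
      have : (passB strips x).length ≠ x.length := fun hl => h (heq hl)
      omega

theorem nil_notin_map (strips : List String) (h : "" ∉ strips) :
    [] ∉ strips.map String.toList := by
  intro hmem
  obtain ⟨s, hs, hsl⟩ := List.mem_map.mp hmem
  have hempty : s = "" := String.toList_inj.mp (by simp [hsl])
  exact h (hempty ▸ hs)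

-- ===== VERDICT (by name: the statement is the Claim_ definition above) =====
theorem stripDecoration_spec : Claim_equal_stripDecoration := by
  intro strips str _ hpre
  unfold Spec_stripDecoration stripDecoration stripDecoration_alt
  have hne : [] ∉ strips.map String.toList := nil_notin_map strips hpre
  have hstep : loopBFuel (strips.map String.toList) (str.toList.length + 2) none str.toList
      = loopBFuel (strips.map String.toList) (str.toList.length + 1) (some str.toList)
          (passB (strips.map String.toList) str.toList) := by
    rfl
  rw [hstep,
      loop_eq (strips.map String.toList) hne (str.toList.length + 1) str.toList (by omega)]
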